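-- pv_equiv track=rewrite | github.com/NicolasVyatkin/Python-testing-uplod | python_exercises/list_but_not_the_least/zigzag_array.py | create_zigzag
-- ===== SOURCE A (Python) =====
-- from typing import List
--
-- def create_zigzag(rows: int, cols: int, start: int = 1) -> List[List[int]]:
--     numbers = range(start, start+rows*cols)
--     array = []
--     for row in range(rows):
--         array.append(list(numbers[row*cols:(row+1)*cols]))
--         if row % 2 == 1:
--             array[-1].reverse()
--     return array
-- ===== SOURCE B (Python) =====
-- def create_zigzag(rows: int, cols: int, start: int = 1):
--     return [
--         [start + r * cols + (c if r % 2 == 0 else cols - 1 - c) for c in range(cols)]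
--         for r in range(rows)
--     ]
-- ===== Notes on version B (the rewrite author's own statement) =====
-- stated objective: simpler
-- what changed: Each cell is computed by closed-form index arithmetic (start + r*cols + (c or cols-1-c)) in a nested comprehension, replacing the build-a-range, slice-per-row and in-place-reverse strategy.
import Mathlib
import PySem

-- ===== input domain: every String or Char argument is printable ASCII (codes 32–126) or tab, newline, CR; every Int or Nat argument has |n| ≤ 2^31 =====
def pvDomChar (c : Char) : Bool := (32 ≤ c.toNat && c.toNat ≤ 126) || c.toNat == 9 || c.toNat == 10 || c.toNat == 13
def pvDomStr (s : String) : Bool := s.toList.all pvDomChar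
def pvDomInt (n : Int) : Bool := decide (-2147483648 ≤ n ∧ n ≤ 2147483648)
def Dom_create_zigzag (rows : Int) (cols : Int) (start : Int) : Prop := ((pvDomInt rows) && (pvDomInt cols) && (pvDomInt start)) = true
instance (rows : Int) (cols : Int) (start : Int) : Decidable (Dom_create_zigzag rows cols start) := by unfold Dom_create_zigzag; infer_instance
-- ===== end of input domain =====

-- B computes each cell by closed-form index arithmetic in a nested comprehension,
-- replacing A's slice-a-range-per-row-then-conditionally-reverse strategy (objective: simpler).

-- ===== PORT A =====
-- 'numbers = range(start, start+rows*cols)' is a LAZY range object; 'numbers[a:b]' is CPython's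
-- O(1) arithmetic on its bounds (clamp a and b into [0, len], shift by the range's start), and
-- 'list(...)' materialises only that slice.  Ported exactly as that arithmetic.
def create_zigzag (rows : Int) (cols : Int) (start : Int) : List (List Int) :=
  let len : Nat := (rows * cols).toNat
  (PySem.List.pyRange 0 rows 1).foldl
    (fun array row =>
      let array := array ++
        [PySem.List.pyRange (start + (PySem.List.clampIdx len (row * cols) : Nat))
          (start + (PySem.List.clampIdx len ((row + 1) * cols) : Nat)) 1]
      if PySem.Int.mod row 2 = 1 then
        array.dropLast ++ [(array.getLastD []).reverse]
      else array) []

-- ===== PORT B =====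
def create_zigzag_alt (rows : Int) (cols : Int) (start : Int) : List (List Int) :=
  (PySem.List.pyRange 0 rows 1).map (fun r =>
    (PySem.List.pyRange 0 cols 1).map (fun c =>
      start + r * cols + (if PySem.Int.mod r 2 = 0 then c else cols - 1 - c)))

-- ===== PRECONDITION & SPEC =====
def Spec_create_zigzag (rows : Int) (cols : Int) (start : Int) (out : List (List Int)) : Prop := out = create_zigzag_alt rows cols start
instance (rows : Int) (cols : Int) (start : Int) (out : List (List Int)) : Decidable (Spec_create_zigzag rows cols start out) := by unfold Spec_create_zigzag; infer_instance

-- ===== CLAIM (what is proved, stated in full; the proofs are below) =====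
def Claim_equal_create_zigzag : Prop := ∀ (rows : Int) (cols : Int) (start : Int), Dom_create_zigzag rows cols start → Spec_create_zigzag rows cols start (create_zigzag rows cols start)

-- ===== LEMMAS AND PROOFS =====

-- A's loop body appends one row then possibly reverses the just-appended last element:
-- it is 'append g row' for g that conditionally reverses the slice.
lemma zig_body (array : List (List Int)) (x : List Int) (row : Int) :
    (if PySem.Int.mod row 2 = 1 then (array ++ [x]).dropLast ++ [((array ++ [x]).getLastD []).reverse]
     else array ++ [x])
    = array ++ [if PySem.Int.mod row 2 = 1 then x.reverse else x] := by
  split_ifs with h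
  · simp
  · rfl

-- the row slice of the flat range, for 0 ≤ r < rows and 0 < cols
lemma zig_slice (rows cols start r : Int) (hr0 : 0 ≤ r) (hr : r < rows) (hc : 0 < cols) :
    PySem.List.pyRange (start + (PySem.List.clampIdx (rows * cols).toNat (r * cols) : Nat))
      (start + (PySem.List.clampIdx (rows * cols).toNat ((r + 1) * cols) : Nat)) 1
    = PySem.List.pyRange (start + r * cols) (start + (r + 1) * cols) 1 := by
  have ha : (0:Int) ≤ r * cols := mul_nonneg hr0 (le_of_lt hc)
  have hb : (0:Int) ≤ (r + 1) * cols := mul_nonneg (by omega) (le_of_lt hc)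
  have hle : (r + 1) * cols ≤ rows * cols := by
    apply mul_le_mul_of_nonneg_right (by omega) (le_of_lt hc)
  have hmono : r * cols ≤ (r + 1) * cols := by nlinarith
  have h1 : (PySem.List.clampIdx (rows * cols).toNat (r * cols) : Int) = r * cols := by
    rw [show r * cols = ((r * cols).toNat : Int) by omega, PySem.List.clampIdx_natCast]
    omega
  have h2 : (PySem.List.clampIdx (rows * cols).toNat ((r + 1) * cols) : Int) = (r + 1) * cols := by
    rw [show (r + 1) * cols = (((r + 1) * cols).toNat : Int) by omega, PySem.List.clampIdx_natCast]
    omega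
  rw [h1, h2]

-- even row: the consecutive range is B's row
lemma zig_even (cols base : Int) :
    PySem.List.pyRange base (base + cols) 1
    = (PySem.List.pyRange 0 cols 1).map (fun c => base + c) := by
  apply List.ext_getElem
  · simp [PySem.List.length_pyRange_one]
  · intro i h1 h2
    simp [PySem.List.getElem_pyRange_one]

-- odd row: the reversed consecutive range is B's row with closed-form cols-1-c
lemma zig_odd (cols base : Int) (hc : 0 < cols) :
    (PySem.List.pyRange base (base + cols) 1).reverse
    = (PySem.List.pyRange 0 cols 1).map (fun c => base + (cols - 1 - c)) := by
  apply List.ext_getElem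
  · simp [PySem.List.length_pyRange_one]
  · intro i h1 h2
    simp only [List.getElem_reverse, List.getElem_map, PySem.List.getElem_pyRange_one]
    simp [PySem.List.length_pyRange_one] at h1 h2 ⊢
    omega

-- ===== VERDICT (by name: the statement is the Claim_ definition above) =====
theorem create_zigzag_spec : Claim_equal_create_zigzag := by
  intro rows cols start _
  show create_zigzag rows cols start = create_zigzag_alt rows cols start
  unfold create_zigzag create_zigzag_alt
  have hbody : ∀ (array : List (List Int)) (row : Int),
      (fun array row =>
        let array' := array ++ [PySem.List.pyRange (start + (PySem.List.clampIdx (rows * cols).toNat (row * cols) : Nat))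
          (start + (PySem.List.clampIdx (rows * cols).toNat ((row + 1) * cols) : Nat)) 1]
        if PySem.Int.mod row 2 = 1 then array'.dropLast ++ [(array'.getLastD []).reverse] else array')
        array row
      = array ++ [if PySem.Int.mod row 2 = 1 then
          (PySem.List.pyRange (start + (PySem.List.clampIdx (rows * cols).toNat (row * cols) : Nat))
            (start + (PySem.List.clampIdx (rows * cols).toNat ((row + 1) * cols) : Nat)) 1).reverse
        else PySem.List.pyRange (start + (PySem.List.clampIdx (rows * cols).toNat (row * cols) : Nat))
            (start + (PySem.List.clampIdx (rows * cols).toNat ((row + 1) * cols) : Nat)) 1] := by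
    intro array row
    exact zig_body array _ row
  simp only [hbody]
  rw [PySem.List.foldl_append_singleton_eq_map]
  simp only [List.nil_append]
  apply List.map_congr_left
  intro r hr
  rw [PySem.List.mem_pyRange_one] at hr
  by_cases hc : 0 < cols
  · rw [zig_slice rows cols start r hr.1 hr.2 hc]
    have hbase : start + (r + 1) * cols = (start + r * cols) + cols := by ring
    rw [hbase]
    by_cases he : PySem.Int.mod r 2 = 1
    · rw [if_pos he, zig_odd cols (start + r * cols) hc]
      simp only [List.map_inj_left, PySem.List.mem_pyRange_one]
      intro a _
      simp
      intro hdvd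
      exact absurd ((PySem.Int.mod_eq_zero_iff_dvd r 2).mpr hdvd) (by rw [he]; decide)
    · have h0 : PySem.Int.mod r 2 = 0 := by
        rcases PySem.Int.mod_two_eq r with h | h
        · exact h
        · exact absurd h he
      rw [if_neg he, zig_even cols (start + r * cols)]
      simp only [List.map_inj_left, PySem.List.mem_pyRange_one]
      intro a _
      simp
      intro h1
      have hm : PySem.Int.mod r 2 = r % 2 := PySem.Int.mod_eq_emod_of_pos (by decide)
      omega
  · -- cols ≤ 0: len = 0, both clamped bounds are 0, so every row is []; B's inner range is [] too
    have hlen0 : (rows * cols).toNat = 0 := by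
      have : rows * cols ≤ 0 := by nlinarith [hr.1, hr.2]
      omega
    have hcl : ∀ k : Int, PySem.List.clampIdx (rows * cols).toNat k = 0 := by
      intro k
      have := PySem.List.clampIdx_le (rows * cols).toNat k
      omega
    have hrow : PySem.List.pyRange (start + (PySem.List.clampIdx (rows * cols).toNat (r * cols) : Nat))
        (start + (PySem.List.clampIdx (rows * cols).toNat ((r + 1) * cols) : Nat)) 1 = [] := by
      rw [hcl, hcl]
      exact PySem.List.pyRange_one_eq_nil (by omega)
    have hcol : PySem.List.pyRange 0 cols 1 = [] := by
      apply PySem.List.pyRange_one_eq_nil; omega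
    simp [hrow, hcol]
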